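-- pv_equiv track=rewrite | github.com/Jerempire/gym-anything | benchmarks/cua_world/environments/graphite_env/tasks/outlier_detection_dashboard/verifier.py | _find_graph_exact_or_partial
-- ===== SOURCE A (Python) =====
-- def _find_graph_exact_or_partial(graphs, expected_title):
--     """Find a graph by exact title, then case-insensitive. Returns (title, targets) or None."""
--     for title, targets in graphs:
--         if title == expected_title:
--             return title, targets
--     for title, targets in graphs:
--         if expected_title.lower() in title.lower():
--             return title, targets
--     return None
-- ===== SOURCE B (Python) =====
-- def _find_graph_exact_or_partial(graphs, expected_title):
--     """Single pass: return exact match immediately; remember the first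
--     case-insensitive partial match as a fallback returned after the scan."""
--     needle = expected_title.lower()
--     partial = None
--     for title, targets in graphs:
--         if title == expected_title:
--             return title, targets
--         if partial is None and needle in title.lower():
--             partial = (title, targets)
--     return partial
-- ===== Notes on version B (the rewrite author's own statement) =====
-- stated objective: faster
-- what changed: Replaced A's two sequential scans (exact pass, then case-insensitive partial pass) by one pass that returns an exact match immediately and keeps the first partial match in a local fallback returned after the loop, lowering the needle once instead of per element.
import Mathlib
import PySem

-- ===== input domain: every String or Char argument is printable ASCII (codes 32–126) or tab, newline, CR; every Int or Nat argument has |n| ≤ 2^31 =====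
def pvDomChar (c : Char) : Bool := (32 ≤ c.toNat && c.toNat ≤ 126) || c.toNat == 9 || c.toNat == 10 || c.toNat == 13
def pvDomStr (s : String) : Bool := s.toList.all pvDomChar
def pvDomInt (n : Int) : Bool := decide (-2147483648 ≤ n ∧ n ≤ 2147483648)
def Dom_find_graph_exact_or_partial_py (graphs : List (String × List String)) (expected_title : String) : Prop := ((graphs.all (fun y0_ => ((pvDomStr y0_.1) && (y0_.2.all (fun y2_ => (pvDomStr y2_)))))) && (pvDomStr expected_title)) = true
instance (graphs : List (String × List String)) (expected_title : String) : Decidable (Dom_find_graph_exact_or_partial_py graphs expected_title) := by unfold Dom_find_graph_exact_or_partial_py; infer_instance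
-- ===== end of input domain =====

-- ===== PORT A =====
-- B differs from A only in decomposition: one pass with a stored fallback instead of two scans.
-- first loop of A: return the first pair whose title equals expected_title
def pvA_exact (graphs : List (String × List String)) (expected_title : String) : Option (String × List String) :=
  match graphs with
  | [] => none
  | (title, targets) :: rest =>
    if title == expected_title then some (title, targets)
    else pvA_exact rest expected_title

-- second loop of A: return the first pair whose lowered title contains the lowered expected_title
def pvA_partial (graphs : List (String × List String)) (expected_title : String) : Option (String × List String) :=
  match graphs with
  | [] => none
  | (title, targets) :: rest =>
    if PySem.Str.isIn (PySem.Str.lower expected_title) (PySem.Str.lower title) then some (title, targets)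
    else pvA_partial rest expected_title

def find_graph_exact_or_partial_py (graphs : List (String × List String)) (expected_title : String) : Option (String × List String) :=
  match pvA_exact graphs expected_title with
  | some p => some p
  | none => pvA_partial graphs expected_title

-- ===== PORT B =====
-- B's single loop: `needle` is expected_title.lower(), `partial` the stored fallback
def pvB_loop (graphs : List (String × List String)) (expected_title : String) (needle : String) (partialAcc : Option (String × List String)) : Option (String × List String) :=
  match graphs with
  | [] => partialAcc
  | (title, targets) :: rest =>
    if title == expected_title then some (title, targets)
    else
      pvB_loop rest expected_title needle
        (if partialAcc.isNone && PySem.Str.isIn needle (PySem.Str.lower title) then some (title, targets)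
         else partialAcc)

def find_graph_exact_or_partial_py_alt (graphs : List (String × List String)) (expected_title : String) : Option (String × List String) :=
  pvB_loop graphs expected_title (PySem.Str.lower expected_title) none

-- ===== PRECONDITION & SPEC =====
def Spec_find_graph_exact_or_partial_py (graphs : List (String × List String)) (expected_title : String) (out : Option (String × List String)) : Prop := out = find_graph_exact_or_partial_py_alt graphs expected_title
instance (graphs : List (String × List String)) (expected_title : String) (out : Option (String × List String)) : Decidable (Spec_find_graph_exact_or_partial_py graphs expected_title out) := by unfold Spec_find_graph_exact_or_partial_py; infer_instance

-- ===== CLAIM =====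
def Claim_equal_find_graph_exact_or_partial_py : Prop := ∀ (graphs : List (String × List String)) (expected_title : String), Dom_find_graph_exact_or_partial_py graphs expected_title → Spec_find_graph_exact_or_partial_py graphs expected_title (find_graph_exact_or_partial_py graphs expected_title)

-- ===== LEMMAS AND PROOFS =====
-- Invariant of B's loop: it equals "first exact match, else the stored fallback, else A's partial scan".
theorem pvB_loop_eq (graphs : List (String × List String)) (expected_title : String)
    (acc : Option (String × List String)) :
    pvB_loop graphs expected_title (PySem.Str.lower expected_title) acc =
      match pvA_exact graphs expected_title with
      | some p => some p
      | none =>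
        match acc with
        | some p => some p
        | none => pvA_partial graphs expected_title := by
  induction graphs generalizing acc with
  | nil => cases acc <;> simp [pvB_loop, pvA_exact, pvA_partial]
  | cons hd rest ih =>
    obtain ⟨title, targets⟩ := hd
    by_cases h : title == expected_title
    · simp [pvB_loop, pvA_exact, h]
    · cases acc with
      | some p => simp [pvB_loop, pvA_exact, pvA_partial, h, ih]
      | none =>
        simp [pvB_loop, pvA_exact, h, ih]
        split
        · rfl
        · by_cases hc : PySem.Chars.isIn (PySem.Chars.lower expected_title.toList)
              (PySem.Chars.lower title.toList) = true <;>
            simp [pvA_partial, PySem.Str.isIn, PySem.Str.lower, hc]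

-- ===== VERDICT =====
theorem find_graph_exact_or_partial_py_spec : Claim_equal_find_graph_exact_or_partial_py := by
  intro graphs expected_title _
  unfold Spec_find_graph_exact_or_partial_py find_graph_exact_or_partial_py find_graph_exact_or_partial_py_alt
  rw [pvB_loop_eq]
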